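-- pv_equiv track=rewrite | github.com/boychenkoaa/lessons | algo3py/generator_abst.py | GenerateBBSTArray
-- ===== SOURCE A (Python) =====
-- def bstH(array_size):
--     ans = -1
--     while array_size > 0:
--         array_size //= 2
--         ans += 1
--     return ans
--
-- def GenerateBBSTArray(a):
--     a.sort()
--     len_a = len(a)
--     H = bstH(len_a)
--     bst = [None] * len_a
--
--     index_bst = 0
--     for h in range(H,-1,-1):
--         left = 2**h - 1
--         step = 2**(h+1)
--         for index_a in range(left, len_a, step):
--             bst[index_bst] = a[index_a]
--             index_bst += 1
--
--     return bst
-- ===== SOURCE B (Python) =====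
-- def GenerateBBSTArray(a):
--     a.sort()
--     n = len(a)
--     order = sorted(range(n), key=lambda i: (-_tz(i + 1), i))
--     return [a[i] for i in order]
--
-- def _tz(m):
--     if m % 2 != 0:
--         return 0
--     return 1 + _tz(m // 2)
-- ===== Notes on version B (the rewrite author's own statement) =====
-- stated objective: alternative
-- what changed: Replaces A's level-by-level strided write loops with a single key-based sort: positions are ordered by (descending trailing-zero count of i+1, ascending i) and the sorted array is mapped through that order.
import Mathlib
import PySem

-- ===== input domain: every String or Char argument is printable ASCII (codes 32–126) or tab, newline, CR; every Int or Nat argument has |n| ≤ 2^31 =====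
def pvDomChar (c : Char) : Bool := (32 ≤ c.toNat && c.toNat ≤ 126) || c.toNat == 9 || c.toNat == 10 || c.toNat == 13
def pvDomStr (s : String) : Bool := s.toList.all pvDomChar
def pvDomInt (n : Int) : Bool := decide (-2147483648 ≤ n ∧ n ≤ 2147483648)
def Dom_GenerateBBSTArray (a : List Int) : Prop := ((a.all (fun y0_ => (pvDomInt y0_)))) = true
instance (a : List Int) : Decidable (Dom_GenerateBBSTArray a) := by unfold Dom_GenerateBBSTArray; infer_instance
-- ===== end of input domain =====

-- Port of GenerateBBSTArray: B rebuilds A's write order by sorting index positions.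
-- Both Pythons sort `a` in place; the equivalence proved here is about the RETURN value
-- (B performs the same in-place sort as A).

-- ===== PORT A =====
-- while array_size > 0: array_size //= 2; ans += 1
def bstHGo (arraySize : Int) (ans : Int) : Int :=
  if h : 0 < arraySize then bstHGo (PySem.Int.floordiv arraySize 2) (ans + 1) else ans
termination_by arraySize.toNat
decreasing_by
  rw [PySem.Int.floordiv_eq_ediv_of_pos (by omega : (0:Int) < 2)]
  omega

def bstH (arraySize : Int) : Int := bstHGo arraySize (-1)

def GenerateBBSTArray (a : List Int) : List (Option Int) :=
  let aS := PySem.List.sorted a (fun x => x)        -- a.sort()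
  let lenA : Int := aS.length
  let H := bstH lenA
  let bst0 : List (Option Int) := List.replicate lenA.toNat none   -- [None] * len_a
  -- for h in range(H, -1, -1): for index_a in range(left, len_a, step): bst[index_bst] = a[index_a]
  -- (h is never negative inside the loop, so 2**h is ported as 2 ^ h.toNat)
  let r := (PySem.List.pyRange H (-1) (-1)).foldl (fun (st : List (Option Int) × Int) h =>
      let left : Int := 2 ^ h.toNat - 1
      let step : Int := 2 ^ (h.toNat + 1)
      (PySem.List.pyRange left lenA step).foldl (fun st indexA =>
        (st.1.set st.2.toNat (some (PySem.List.pyGetD aS indexA 0)), st.2 + 1)) st)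
    (bst0, 0)
  r.1

-- ===== PORT B =====
-- trailing-zero count of m (only ever called with m >= 1; the 0 < m guard makes the
-- recursion total where the Python recursion would not return)
def tzB (m : Int) : Int :=
  if PySem.Int.mod m 2 != 0 then 0
  else if h : 0 < m then 1 + tzB (PySem.Int.floordiv m 2) else 0
termination_by m.toNat
decreasing_by
  rw [PySem.Int.floordiv_eq_ediv_of_pos (by omega : (0:Int) < 2)]
  omega

def GenerateBBSTArray_alt (a : List Int) : List (Option Int) :=
  let aS := PySem.List.sorted a (fun x => x)        -- a.sort()
  let n : Int := aS.length
  let order := PySem.List.sorted2 (PySem.List.pyRange 0 n 1)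
      (fun i => -(tzB (i + 1))) (fun i => i)        -- sorted(range(n), key=lambda i: (-tz(i+1), i))
  order.map (fun i => some (PySem.List.pyGetD aS i 0))

-- ===== PRECONDITION & SPEC =====
def Spec_GenerateBBSTArray (a : List Int) (out : List (Option Int)) : Prop := out = GenerateBBSTArray_alt a
instance (a : List Int) (out : List (Option Int)) : Decidable (Spec_GenerateBBSTArray a out) := by unfold Spec_GenerateBBSTArray; infer_instance

-- ===== CLAIM (what is proved, stated in full; the proofs are below) =====
def Claim_equal_GenerateBBSTArray : Prop := ∀ (a : List Int), Dom_GenerateBBSTArray a → Spec_GenerateBBSTArray a (GenerateBBSTArray a)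

-- ===== LEMMAS AND PROOFS =====

theorem bstHGo_natCast (m : Nat) (ans : Int) : bstHGo (m : Int) ans = ans + PySem.Int.bitLength (m : Int) := by
  induction m using Nat.strong_induction_on generalizing ans with
  | _ m ih =>
    rw [bstHGo]
    by_cases h : 0 < m
    · have h' : (0:Int) < m := by exact_mod_cast h
      rw [dif_pos h', show ((2:Int) = ((2:Nat):Int)) from rfl, PySem.Int.floordiv_natCast m 2,
          ih (m/2) (by omega) (ans+1), PySem.Int.bitLength_natCast h]
      push_cast; ring
    · have hm : m = 0 := by omega
      subst hm
      simp [PySem.Int.bitLength_zero]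

theorem tzB_pow_mul_odd (e q : Nat) : tzB ((2:Int)^e * (2*q+1)) = e := by
  induction e with
  | zero =>
    rw [tzB]
    have : PySem.Int.mod ((2:Int)^0 * (2*q+1)) 2 = 1 := by
      have h1 := PySem.Int.mod_natCast (2*q+1) 2
      have h2 : ((2*q+1) % 2 : Nat) = 1 := by omega
      rw [h2] at h1
      push_cast at h1 ⊢
      convert h1 using 2
      ring
    rw [this]
    norm_num
  | succ e ih =>
    rw [tzB]
    have hmod : PySem.Int.mod ((2:Int)^(e+1) * (2*q+1)) 2 = 0 := by
      rw [PySem.Int.mod_eq_zero_iff_dvd]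
      exact ⟨2^e * (2*q+1), by ring⟩
    have hpos : (0:Int) < (2:Int)^(e+1) * (2*q+1) := by positivity
    have hdiv : PySem.Int.floordiv ((2:Int)^(e+1) * (2*q+1)) 2 = (2:Int)^e * (2*q+1) := by
      rw [PySem.Int.floordiv_eq_ediv_of_pos (by omega)]
      have : (2:Int)^(e+1) * (2*q+1) = 2 * ((2:Int)^e * (2*q+1)) := by ring
      rw [this, Int.mul_ediv_cancel_left _ (by omega)]
    rw [hmod]
    simp only [bne_self_eq_false, Bool.false_eq_true, if_false, dif_pos hpos, hdiv, ih]
    push_cast; ring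

def grpI (h N : Nat) : List Int := PySem.List.pyRange ((2:Int)^h - 1) (N : Int) ((2:Int)^(h+1))

theorem mem_grpI_iff (h N : Nat) (x : Int) :
    x ∈ grpI h N ↔ (∃ q : Nat, x + 1 = (2:Int)^h * (2*q+1)) ∧ x < N := by
  unfold grpI
  rw [PySem.List.mem_pyRange_iff_of_pos (by positivity)]
  constructor
  · rintro ⟨h1, h2, t, ht⟩
    refine ⟨⟨t.toNat, ?_⟩, h2⟩
    have hpow : (0:Int) < (2:Int)^h := by positivity
    have ht' : x - ((2:Int)^h - 1) = (2:Int)^(h+1) * t := ht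
    have htnn : 0 ≤ t := by nlinarith [pow_pos (show (0:Int) < 2 by norm_num) (h+1)]
    have : (t.toNat : Int) = t := Int.toNat_of_nonneg htnn
    rw [this]
    rw [pow_succ] at ht'
    linarith
  · rintro ⟨⟨q, hq⟩, hx⟩
    have hpow : (1:Int) ≤ (2:Int)^h := one_le_pow₀ (by norm_num)
    refine ⟨by nlinarith, hx, (q:Int), ?_⟩
    rw [pow_succ]
    linear_combination hq

theorem tzB_mem_grpI (h N : Nat) (x : Int) (hx : x ∈ grpI h N) : tzB (x+1) = h := by
  obtain ⟨⟨q, hq⟩, -⟩ := (mem_grpI_iff h N x).1 hx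
  rw [hq]
  have := tzB_pow_mul_odd h q
  convert this using 2

def hsI (N : Nat) : List Int := PySem.List.pyRange ((PySem.Int.bitLength (N:Int) : Int) - 1) (-1) (-1)

def idxL (N : Nat) : List Int := (hsI N).flatMap (fun h => grpI h.toNat N)

theorem mem_hsI_iff (N : Nat) (h : Int) :
    h ∈ hsI N ↔ 0 ≤ h ∧ h < (PySem.Int.bitLength (N:Int) : Int) := by
  unfold hsI
  rw [PySem.List.mem_pyRange_neg_one]
  omega

theorem mem_idxL_iff (N : Nat) (x : Int) : x ∈ idxL N ↔ 0 ≤ x ∧ x < N := by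
  unfold idxL
  rw [List.mem_flatMap]
  constructor
  · rintro ⟨h, hh, hx⟩
    obtain ⟨⟨q, hq⟩, hlt⟩ := (mem_grpI_iff _ _ _).1 hx
    have hpow : (1:Int) ≤ (2:Int)^h.toNat := one_le_pow₀ (by norm_num)
    constructor
    · nlinarith
    · exact hlt
  · rintro ⟨hx0, hxN⟩
    -- x+1 = 2^e * odd
    have hm : (x+1).toNat ≠ 0 := by omega
    obtain ⟨e, n', hodd, hdec⟩ := Nat.exists_eq_pow_mul_and_not_dvd hm 2 (by norm_num)
    have hq : ∃ q : Nat, n' = 2*q+1 := ⟨n'/2, by omega⟩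
    obtain ⟨q, rfl⟩ := hq
    refine ⟨(e : Int), ?_, ?_⟩
    · rw [mem_hsI_iff]
      refine ⟨by positivity, ?_⟩
      -- 2^e ≤ x+1 ≤ N < 2^bitLength N
      have h1 : 2^e ≤ (x+1).toNat := by
        calc 2^e ≤ 2^e * (2*q+1) := Nat.le_mul_of_pos_right _ (by omega)
        _ = (x+1).toNat := hdec.symm
      have h2 : (x+1).toNat ≤ N := by omega
      have h3 : N < 2 ^ PySem.Int.bitLength (N:Int) := by
        have := PySem.Int.lt_two_pow_bitLength (N:Int)
        simpa using this
      have : 2^e < 2^(PySem.Int.bitLength (N:Int)) := by omega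
      have he : e < PySem.Int.bitLength (N:Int) := by
        exact (Nat.pow_lt_pow_iff_right (by norm_num)).1 this
      exact_mod_cast he
    · rw [mem_grpI_iff]
      refine ⟨⟨q, ?_⟩, by omega⟩
      have : ((x+1).toNat : Int) = x + 1 := by omega
      rw [Int.toNat_of_nonneg (by omega) ] at this
      have hd : ((2:Int)^e * (2*q+1) : Int) = (((2^e * (2*q+1)) : Nat) : Int) := by push_cast; ring
      rw [show (((e:Int)).toNat) = e by omega, hd, ← hdec]
      omega

def KB : Int → Int ×ₗ Int := fun i => toLex (-(tzB (i+1)), i)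

theorem KB_lt_of_fst_lt {a b : Int} (h : -(tzB (a+1)) < -(tzB (b+1))) : KB a < KB b := by
  simp [KB, Prod.Lex.lt_iff, h]

theorem KB_lt_of_fst_eq {a b : Int} (h1 : tzB (a+1) = tzB (b+1)) (h2 : a < b) : KB a < KB b := by
  simp [KB, Prod.Lex.lt_iff, h1, h2]

theorem pairwise_lt_grpI (h N : Nat) : (grpI h N).Pairwise (· < ·) := by
  unfold grpI
  rw [PySem.List.pyRange_of_pos _ _ (by positivity)]
  refine List.Pairwise.map _ ?_ (List.pairwise_lt_range)
  intro a b hab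
  have : (0:Int) < (2:Int)^(h+1) := by positivity
  have : ((a:Int)) < b := by exact_mod_cast hab
  nlinarith

theorem pairwise_KB_grpI (h N : Nat) : (grpI h N).Pairwise (fun a b => KB a < KB b) := by
  refine (pairwise_lt_grpI h N).imp_of_mem ?_
  intro a b ha hb hab
  exact KB_lt_of_fst_eq (by rw [tzB_mem_grpI h N a ha, tzB_mem_grpI h N b hb]) hab

theorem pairwise_gt_hsI (N : Nat) : (hsI N).Pairwise (· > ·) := by
  unfold hsI
  rw [PySem.List.pyRange_neg_one]
  refine List.Pairwise.map _ ?_ (List.pairwise_lt_range)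
  intro a b hab
  have : ((a:Int)) < b := by exact_mod_cast hab
  omega

theorem pairwise_KB_flat (N : Nat) (hs : List Int) (hpw : hs.Pairwise (· > ·))
    (hmem : ∀ h ∈ hs, 0 ≤ h) :
    (hs.flatMap (fun h => grpI h.toNat N)).Pairwise (fun a b => KB a < KB b) := by
  induction hs with
  | nil => simp
  | cons h hs ih =>
    rw [List.flatMap_cons, List.pairwise_append]
    obtain ⟨hcross, htail⟩ := List.pairwise_cons.1 hpw
    refine ⟨pairwise_KB_grpI _ _, ih htail (fun h' hh' => hmem h' (List.mem_cons_of_mem _ hh')), ?_⟩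
    intro a ha b hb
    obtain ⟨h', hh', hb'⟩ := List.mem_flatMap.1 hb
    have hlt : h' < h := hcross h' hh'
    have h0 : 0 ≤ h' := hmem h' (List.mem_cons_of_mem _ hh')
    have ha' : tzB (a+1) = h.toNat := tzB_mem_grpI _ _ _ ha
    have hb'' : tzB (b+1) = h'.toNat := tzB_mem_grpI _ _ _ hb'
    apply KB_lt_of_fst_lt
    rw [ha', hb'']
    omega

theorem pairwise_KB_idxL (N : Nat) : (idxL N).Pairwise (fun a b => KB a < KB b) :=
  pairwise_KB_flat N (hsI N) (pairwise_gt_hsI N) (fun h hh => ((mem_hsI_iff N h).1 hh).1)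

theorem nodup_idxL (N : Nat) : (idxL N).Nodup := by
  refine (pairwise_KB_idxL N).imp ?_
  intro a b hab he
  subst he
  exact lt_irrefl _ hab

theorem perm_idxL (N : Nat) : (idxL N).Perm (PySem.List.pyRange 0 (N:Int) 1) := by
  rw [List.perm_ext_iff_of_nodup (nodup_idxL N) (PySem.List.nodup_pyRange_one 0 (N:Int))]
  intro x
  rw [mem_idxL_iff, PySem.List.mem_pyRange_one]

theorem before_eq_KB :
    (fun (a b : Int) => decide (-(tzB (a+1)) < -(tzB (b+1))) ||
        (!decide (-(tzB (b+1)) < -(tzB (a+1))) && decide (a < b)))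
      = (fun (a b : Int) => decide (KB a < KB b)) := by
  funext a b
  by_cases h1 : -(tzB (a+1)) < -(tzB (b+1))
  · simp [h1, KB_lt_of_fst_lt h1]
  · by_cases h2 : -(tzB (b+1)) < -(tzB (a+1))
    · have hn : ¬ KB a < KB b := by
        intro hc
        rw [KB, KB, Prod.Lex.lt_iff] at hc
        simp at hc
        omega
      simp [h1, h2, hn]
    · have he : tzB (a+1) = tzB (b+1) := by omega
      by_cases h3 : a < b
      · simp [h1, h2, h3, KB_lt_of_fst_eq he h3]
      · have hn : ¬ KB a < KB b := by
          intro hc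
          rw [KB, KB, Prod.Lex.lt_iff] at hc
          simp at hc
          omega
        simp [h1, h2, h3, hn]

theorem sorted2_eq_sorted_KB (xs : List Int) :
    PySem.List.sorted2 xs (fun i => -(tzB (i+1))) (fun i => i) false
      = PySem.List.sorted xs KB false := by
  rw [PySem.List.sorted_eq_foldl_insertBy]
  show List.foldl (fun acc x => PySem.List.insertBy
      (fun a b => decide (-(tzB (a+1)) < -(tzB (b+1))) ||
        (!decide (-(tzB (b+1)) < -(tzB (a+1))) && decide (a < b))) x acc) [] xs = _
  rw [before_eq_KB]

theorem foldl_foldl_flatMap {S : Type} (g : Int → List Int) (F : S → Int → S) :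
    ∀ (hs : List Int) (init : S),
      hs.foldl (fun st h => (g h).foldl F st) init = (hs.flatMap g).foldl F init := by
  intro hs
  induction hs with
  | nil => intro init; rfl
  | cons h hs ih =>
    intro init
    rw [List.foldl_cons, List.flatMap_cons, List.foldl_append, ih]

theorem foldl_write (f : Int → Option Int) :
    ∀ (js : List Int) (pre suf : List (Option Int)), js.length ≤ suf.length →
      js.foldl (fun (st : List (Option Int) × Int) j => (st.1.set st.2.toNat (f j), st.2 + 1))
          (pre ++ suf, (pre.length : Int))
        = (pre ++ js.map f ++ suf.drop js.length, (pre.length : Int) + js.length) := by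
  intro js
  induction js with
  | nil => intro pre suf h; simp
  | cons j js ih =>
    intro pre suf h
    match suf with
    | [] => simp at h
    | s0 :: suf' =>
      rw [List.foldl_cons]
      have hset : (pre ++ s0 :: suf').set (pre.length : Int).toNat (f j) = (pre ++ [f j]) ++ suf' := by
        rw [Int.toNat_natCast, List.set_append_right _ _ (le_refl _)]
        simp
      have hlen : ((pre ++ [f j]).length : Int) = (pre.length : Int) + 1 := by simp
      have := ih (pre ++ [f j]) suf' (by simpa using Nat.le_of_succ_le_succ h)
      rw [hlen] at this
      simp only [hset, this]
      rw [Prod.mk.injEq]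
      refine ⟨by simp, by simp [List.length_cons]; omega⟩

theorem length_idxL (N : Nat) : (idxL N).length = N := by
  have := (perm_idxL N).length_eq
  rw [PySem.List.length_pyRange_one] at this
  omega

theorem main_eq (a : List Int) : GenerateBBSTArray a = GenerateBBSTArray_alt a := by
  simp only [GenerateBBSTArray, GenerateBBSTArray_alt]
  set s := PySem.List.sorted a (fun x => x) with hs
  set N := s.length with hN
  have hH : bstH ((N : Nat) : Int) = (PySem.Int.bitLength ((N:Nat):Int) : Int) - 1 := by
    unfold bstH
    rw [bstHGo_natCast]
    ring
  have hflat := foldl_foldl_flatMap (fun h => grpI h.toNat N)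
      (fun (st : List (Option Int) × Int) indexA =>
        (st.1.set st.2.toNat (some (PySem.List.pyGetD s indexA 0)), st.2 + 1))
      (hsI N) (List.replicate ((N:Int)).toNat none, 0)
  unfold grpI hsI at hflat
  have hlen : (idxL N).length ≤ (List.replicate N none : List (Option Int)).length := by
    rw [length_idxL, List.length_replicate]
  have hw := foldl_write (fun j => some (PySem.List.pyGetD s j 0)) (idxL N)
      [] (List.replicate N none) (by simpa using hlen)
  simp only [List.nil_append, List.length_nil, Nat.cast_zero, length_idxL,
    List.drop_replicate, Nat.sub_self, List.replicate_zero, List.append_nil] at hw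
  have hsorted : PySem.List.sorted (PySem.List.pyRange 0 ((N:Nat):Int) 1) KB = idxL N :=
    PySem.List.sorted_eq_of_perm_of_pairwise_lt _ _ _ (perm_idxL N) (pairwise_KB_idxL N)
  rw [hH] at *
  rw [sorted2_eq_sorted_KB, hsorted]
  rw [Int.toNat_natCast] at hflat ⊢
  have hfold : (List.flatMap (fun h => PySem.List.pyRange (2 ^ h.toNat - 1) ((N:Nat):Int) (2 ^ (h.toNat + 1)))
      (PySem.List.pyRange ((PySem.Int.bitLength ((N:Nat):Int) : Int) - 1) (-1) (-1))) = idxL N := rfl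
  rw [hflat, hfold, hw]

-- ===== VERDICT (by name: the statement is the Claim_ definition above) =====
theorem GenerateBBSTArray_spec : Claim_equal_GenerateBBSTArray := by
  intro a _
  unfold Spec_GenerateBBSTArray
  exact main_eq a
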